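-- pv_equiv track=rewrite | github.com/Jasraj-Jassar/turbo_apply | scraper.py | _is_linkedin_auth_wall
-- ===== SOURCE A (Python) =====
-- def _is_linkedin_auth_wall(html: str) -> bool:
--     """Check if LinkedIn is showing a sign-in wall."""
--     lower = html.lower()
--     indicators = [
--         "sign in to view",
--         "join now to see",
--         "authwall",
--         "sign in or join",
--         "login-form",
--         '"isLoggedIn":false',
--     ]
--     return any(ind in lower for ind in indicators)
-- ===== SOURCE B (Python) =====
-- INDICATORS = (
--     "sign in to view",
--     "join now to see",
--     "authwall",
--     "sign in or join",
--     "login-form",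
--     '"isLoggedIn":false',
-- )
--
-- def _is_linkedin_auth_wall(html: str) -> bool:
--     """Check if LinkedIn is showing a sign-in wall.
--
--     Single left-to-right pass: at each position of the lowercased HTML,
--     test whether any indicator starts there (position-major scan instead
--     of one full substring scan per indicator)."""
--     lower = html.lower()
--     for i in range(len(lower)):
--         for ind in INDICATORS:
--             if lower.startswith(ind, i):
--                 return True
--     return False
-- ===== Notes on version B (the rewrite author's own statement) =====
-- stated objective: alternative
-- what changed: Replaces six independent full substring scans, one per indicator, by a single position-major left-to-right pass that at each index tests whether some indicator starts there.
import Mathlib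
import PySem

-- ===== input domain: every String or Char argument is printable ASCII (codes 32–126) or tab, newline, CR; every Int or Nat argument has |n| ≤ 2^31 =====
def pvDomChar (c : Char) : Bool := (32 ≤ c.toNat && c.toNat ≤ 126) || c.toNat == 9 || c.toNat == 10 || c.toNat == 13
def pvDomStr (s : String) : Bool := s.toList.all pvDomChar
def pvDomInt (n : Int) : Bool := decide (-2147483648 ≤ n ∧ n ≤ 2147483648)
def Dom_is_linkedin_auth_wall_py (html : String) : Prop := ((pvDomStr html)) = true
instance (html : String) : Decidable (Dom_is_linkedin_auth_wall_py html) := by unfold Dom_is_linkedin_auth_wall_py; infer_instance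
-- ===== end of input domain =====

-- B replaces six independent substring scans by one position-major left-to-right pass (alternative decomposition, same cost).
-- ===== PORT A =====
def pvIndicators : List String :=
  ["sign in to view", "join now to see", "authwall", "sign in or join",
   "login-form", "\"isLoggedIn\":false"]

def is_linkedin_auth_wall_py (html : String) : Bool :=
  let lower := PySem.Str.lower html
  pvIndicators.any (fun ind => PySem.Str.isIn ind lower)

-- ===== PORT B =====
-- position-major scan: at each suffix, test whether some indicator is a prefix there
def pvScan (inds : List (List Char)) : List Char → Bool
  | [] => false
  | c :: rest =>
    if inds.any (fun ind => ind.isPrefixOf (c :: rest)) then true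
    else pvScan inds rest

def is_linkedin_auth_wall_py_alt (html : String) : Bool :=
  pvScan (pvIndicators.map String.toList) (PySem.Str.lower html).toList

-- ===== PRECONDITION & SPEC =====
def Spec_is_linkedin_auth_wall_py (html : String) (out : Bool) : Prop := out = is_linkedin_auth_wall_py_alt html
instance (html : String) (out : Bool) : Decidable (Spec_is_linkedin_auth_wall_py html out) := by unfold Spec_is_linkedin_auth_wall_py; infer_instance

-- ===== CLAIM (what is proved, stated in full; the proofs are below) =====
def Claim_equal_is_linkedin_auth_wall_py : Prop := ∀ (html : String), Dom_is_linkedin_auth_wall_py html → Spec_is_linkedin_auth_wall_py html (is_linkedin_auth_wall_py html)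

-- ===== LEMMAS AND PROOFS =====

lemma pvScan_eq_any_isIn (inds : List (List Char)) (h : ∀ ind ∈ inds, ind ≠ []) :
    ∀ s : List Char, pvScan inds s = inds.any (fun ind => PySem.Chars.isIn ind s) := by
  intro s
  induction s with
  | nil =>
    simp only [pvScan]
    symm
    simp only [List.any_eq_false]
    intro ind hind
    rw [PySem.Chars.isIn_iff_infix]
    intro hinf
    exact h ind hind (List.eq_nil_of_infix_nil hinf)
  | cons c rest ih =>
    simp only [pvScan]
    by_cases hp : inds.any (fun ind => ind.isPrefixOf (c :: rest)) = true
    · simp only [hp, if_true]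
      symm
      rw [List.any_eq_true] at hp ⊢
      obtain ⟨ind, hind, hpre⟩ := hp
      refine ⟨ind, hind, ?_⟩
      rw [PySem.Chars.isIn_iff_infix]
      exact (List.isPrefixOf_iff_prefix.mp hpre).isInfix
    · simp only [hp, ih, Bool.false_eq_true, if_false]
      refine Bool.eq_iff_iff.mpr ⟨fun hx => ?_, fun hx => ?_⟩
      · rw [List.any_eq_true] at hx ⊢
        obtain ⟨ind, hind, hIn⟩ := hx
        refine ⟨ind, hind, ?_⟩
        rw [PySem.Chars.isIn_iff_infix] at hIn ⊢
        exact hIn.trans (List.suffix_cons c rest).isInfix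
      · rw [List.any_eq_true] at hx ⊢
        obtain ⟨ind, hind, hIn⟩ := hx
        refine ⟨ind, hind, ?_⟩
        rw [PySem.Chars.isIn_iff_infix] at hIn ⊢
        rcases List.infix_cons_iff.mp hIn with hpre | hinf
        · exact absurd (show (inds.any fun ind => ind.isPrefixOf (c :: rest)) = true from
            List.any_eq_true.mpr ⟨ind, hind, List.isPrefixOf_iff_prefix.mpr hpre⟩) hp
        · exact hinf

-- ===== VERDICT =====
theorem is_linkedin_auth_wall_py_spec : Claim_equal_is_linkedin_auth_wall_py := by
  intro html _
  unfold Spec_is_linkedin_auth_wall_py is_linkedin_auth_wall_py is_linkedin_auth_wall_py_alt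
  rw [pvScan_eq_any_isIn _ (by decide)]
  simp only [List.any_map]
  rfl
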